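-- pv_equiv track=rewrite | github.com/kkr010128/codebert | problem181/problem181_140.py | solve
-- ===== SOURCE A (Python) =====
-- import queue
--
-- def solve(k):
--     q = queue.Queue()
--     for i in range(1, 10):
--         q.put(i)
--     for i in range(k):
--         n = q.get()
--         if i == k - 1:
--             return n
--         if n % 10 == 0:
--             q.put(n * 10)
--             q.put(n * 10 + 1)
--         elif n % 10 == 9:
--             q.put(n * 10 + 8)
--             q.put(n * 10 + 9)
--         else:
--             l = n % 10
--             q.put(n * 10 + l - 1)
--             q.put(n * 10 + l)
--             q.put(n * 10 + l + 1)
-- ===== SOURCE B (Python) =====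
-- def solve(k):
--     # rows[j][d] = number of length-(j+1) digit strings starting with digit d
--     # whose adjacent digits differ by at most 1
--     rows = [[1] * 10]
--     while k > sum(rows[-1][1:]):
--         k -= sum(rows[-1][1:])
--         prev = rows[-1]
--         rows.append([(prev[d - 1] if d > 0 else 0) + prev[d] +
--                      (prev[d + 1] if d < 9 else 0) for d in range(10)])
--     n = 0
--     cand = range(1, 10)
--     for row in reversed(rows):
--         for d in cand:
--             if k > row[d]:
--                 k -= row[d]
--             else:
--                 n = n * 10 + d
--                 break
--         cand = range(max(d - 1, 0), min(d + 1, 9) + 1)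
--     return n
-- ===== Notes on version B (the rewrite author's own statement) =====
-- stated objective: faster
-- what changed: A pops a FIFO queue k times, generating every stepping-like number up to the answer; B counts candidates per digit-length with a small DP row, then builds the k-th number digit by digit, skipping whole blocks by their counts.
-- outside the precondition, e.g. on solve(0): A returns None, B returns 1
import Mathlib
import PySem

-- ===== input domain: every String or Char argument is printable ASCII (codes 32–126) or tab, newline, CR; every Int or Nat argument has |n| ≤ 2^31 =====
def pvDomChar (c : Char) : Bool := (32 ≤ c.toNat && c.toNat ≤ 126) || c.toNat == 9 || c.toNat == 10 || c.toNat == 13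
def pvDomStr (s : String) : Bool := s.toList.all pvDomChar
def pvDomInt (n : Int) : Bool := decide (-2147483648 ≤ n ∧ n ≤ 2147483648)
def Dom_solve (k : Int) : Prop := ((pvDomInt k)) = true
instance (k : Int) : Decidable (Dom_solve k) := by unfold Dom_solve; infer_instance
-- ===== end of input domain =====

-- B replaces A's O(k) breadth-first queue generation by digit-length counting plus
-- digit-by-digit construction of the k-th number (measured faster at large k).

-- ===== PORT A =====
-- the three put-branches of A's loop body, as the list of enqueued successors of n
def childrenA (n : Int) : List Int :=
  if PySem.Int.mod n 10 = 0 then [n * 10, n * 10 + 1]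
  else if PySem.Int.mod n 10 = 9 then [n * 10 + 8, n * 10 + 9]
  else [n * 10 + PySem.Int.mod n 10 - 1, n * 10 + PySem.Int.mod n 10,
        n * 10 + PySem.Int.mod n 10 + 1]

-- A's 'for i in range(k)' loop; r counts the iterations remaining after the current one;
-- the queue is a FIFO list (q.get = head, q.put = append).  The queue A builds is never
-- empty when read, so the [] branch is unreachable.
def solveLoop : List Int → Nat → Int
  | [], _ => 0
  | n :: _, 0 => n
  | n :: rest, r + 1 => solveLoop (rest ++ childrenA n) r

def solve (k : Int) : Int := solveLoop (PySem.List.pyRange 1 10 1) (k - 1).toNat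

-- ===== PORT B =====
-- one step of B's row recurrence: next[d] = (prev[d-1] if d>0 else 0) + prev[d] + (prev[d+1] if d<9 else 0)
def nextRowB (prev : List Int) : List Int :=
  (PySem.List.pyRange 0 10 1).map (fun d =>
    (if 0 < d then PySem.List.pyGetD prev (d - 1) 0 else 0) +
    PySem.List.pyGetD prev d 0 +
    (if d < 9 then PySem.List.pyGetD prev (d + 1) 0 else 0))

-- sum(row[1:])
def rowTotal (row : List Int) : Int := (PySem.List.slice row (some 1) none).sum

-- B's while loop; Source B's `rows` is kept in REVERSE (rows[-1] is the head), so that the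
-- later `for row in reversed(rows)` is a plain traversal.  fuel bounds the iterations
-- (each one decreases k by at least 9, so k.toNat is always enough).
def growB : Nat → Int → List (List Int) → Int × List (List Int)
  | 0, k, rrows => (k, rrows)
  | fuel + 1, k, rrows =>
    let last := rrows.headD []
    if rowTotal last < k then growB fuel (k - rowTotal last) (nextRowB last :: rrows)
    else (k, rrows)

-- B's inner 'for d in cand' loop with break: returns (k after the subtractions, chosen d)
def pickD : Int → List Int → List Int → Int × Int
  | k, _, [] => (k, 0)
  | k, row, d :: ds =>
    if PySem.List.pyGetD row d 0 < k then pickD (k - PySem.List.pyGetD row d 0) row ds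
    else (k, d)

-- B's outer 'for row in reversed(rows)' loop over state (k, n, cand)
def pickLoop : List (List Int) → Int → Int → List Int → Int
  | [], _, n, _ => n
  | row :: rs, k, n, cand =>
    match pickD k row cand with
    | (k', d) => pickLoop rs k' (n * 10 + d)
        (PySem.List.pyRange (max (d - 1) 0) (min (d + 1) 9 + 1) 1)

def solve_alt (k : Int) : Int :=
  match growB k.toNat k [List.replicate 10 1] with
  | (k', rrows) => pickLoop rrows k' 0 (PySem.List.pyRange 1 10 1)

-- ===== PRECONDITION & SPEC =====
-- Pre_ excludes k ≤ 0, where A's loop body never runs and A returns None instead of an int.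
def Pre_solve (k : Int) : Prop := 1 ≤ k
instance (k : Int) : Decidable (Pre_solve k) := by unfold Pre_solve; infer_instance
def pvWitness_solve : Int := (12)
def Spec_solve (k : Int) (out : Int) : Prop := out = solve_alt k
instance (k : Int) (out : Int) : Decidable (Spec_solve k out) := by unfold Spec_solve; infer_instance

-- ===== CLAIM (what is proved, stated in full; the proofs are below) =====
def Claim_equal_solve : Prop := ∀ (k : Int), Dom_solve k → Pre_solve k → Spec_solve k (solve k)

-- ===== LEMMAS AND PROOFS =====

-- the last digits that may follow last digit l (= B's updated cand, = A's appended digits)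
def candL (l : Int) : List Int :=
  if l = 0 then [0, 1] else if l = 9 then [8, 9] else [l - 1, l, l + 1]

def desc : Nat → Int → List Int
  | 0, n => [n]
  | m + 1, n => (childrenA n).flatMap (desc m)

def W : Nat → Int → Int
  | 0, _ => 1
  | m + 1, d => ((candL d).map (W m)).sum

def wRow (m : Nat) : List Int := (PySem.List.pyRange 0 10 1).map (fun d => W m d)

def init9 : List Int := PySem.List.pyRange 1 10 1

def T (m : Nat) : Int := (init9.map (W m)).sum

def recRows : Nat → List (List Int)
  | 0 => [wRow 0]
  | m + 1 => wRow (m + 1) :: recRows m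

def SumT : Nat → Int
  | 0 => 0
  | m + 1 => SumT m + T m

def LS : List Int → Nat → Nat
  | _, 0 => 0
  | q, m + 1 => q.length + LS (q.flatMap childrenA) m

def iterC : Nat → List Int → List Int
  | 0, q => q
  | m + 1, q => (iterC m q).flatMap childrenA

def totalSeq : List Int → Nat → List Int
  | _, 0 => []
  | q, f + 1 => q ++ totalSeq (q.flatMap childrenA) f

theorem mod10_lt (n : Int) : 0 ≤ PySem.Int.mod n 10 ∧ PySem.Int.mod n 10 < 10 := by
  rw [PySem.Int.mod_eq_emod_of_pos (by norm_num)]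
  constructor
  · exact Int.emod_nonneg n (by norm_num)
  · exact Int.emod_lt_of_pos n (by norm_num)

theorem childrenA_eq (n : Int) :
    childrenA n = (candL (PySem.Int.mod n 10)).map (fun d => n * 10 + d) := by
  unfold childrenA candL
  split_ifs with h1 h2 <;> simp <;> constructor <;> ring

theorem childrenA_ne_nil (n : Int) : childrenA n ≠ [] := by
  unfold childrenA; split_ifs <;> simp

theorem candL_mem {l d : Int} (hl : 0 ≤ l) (hl' : l < 10) (hd : d ∈ candL l) :
    0 ≤ d ∧ d < 10 := by
  unfold candL at hd
  split_ifs at hd with h1 h2 <;> simp at hd <;> omega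

theorem candL_ne_nil (l : Int) : candL l ≠ [] := by
  unfold candL; split_ifs <;> simp

theorem mod10_digit (n d : Int) (h0 : 0 ≤ d) (h1 : d < 10) :
    PySem.Int.mod (n * 10 + d) 10 = d := by
  rw [PySem.Int.mod_eq_emod_of_pos (by norm_num)]
  omega

theorem candR_eq (d : Int) (h0 : 0 ≤ d) (h1 : d < 10) :
    PySem.List.pyRange (max (d - 1) 0) (min (d + 1) 9 + 1) 1 = candL d := by
  have : d = 0 ∨ d = 1 ∨ d = 2 ∨ d = 3 ∨ d = 4 ∨ d = 5 ∨ d = 6 ∨ d = 7 ∨ d = 8 ∨ d = 9 := by omega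
  rcases this with h|h|h|h|h|h|h|h|h|h <;> subst h <;> decide

theorem mod10_self (d : Int) (h0 : 0 ≤ d) (h1 : d < 10) : PySem.Int.mod d 10 = d := by
  have := mod10_digit 0 d h0 h1
  simpa using this

theorem flatMap_c_ne_nil {q : List Int} (h : q ≠ []) : q.flatMap childrenA ≠ [] := by
  cases q with
  | nil => exact absurd rfl h
  | cons x xs =>
    simp [List.flatMap_cons]
    intro hc
    exact absurd hc (childrenA_ne_nil x)

theorem iterC_succ_left (m : Nat) (q : List Int) :
    iterC (m + 1) q = iterC m (q.flatMap childrenA) := by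
  induction m generalizing q with
  | zero => rfl
  | succ m ih => show (iterC (m+1) q).flatMap childrenA = _
                 rw [ih q]; rfl

theorem totalSeq_split (f : Nat) (a b : List Int) :
    totalSeq (a ++ b) (f + 1) =
      a ++ (totalSeq (b ++ a.flatMap childrenA) f ++ iterC f b) := by
  induction f generalizing a b with
  | zero => simp [totalSeq, iterC]
  | succ f ih =>
    show (a ++ b) ++ totalSeq ((a++b).flatMap childrenA) (f+1) = _
    rw [List.flatMap_append, ih (a.flatMap childrenA) (b.flatMap childrenA)]
    show _ = a ++ ((b ++ a.flatMap childrenA) ++ totalSeq _ f ++ iterC (f+1) b)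
    rw [List.flatMap_append, iterC_succ_left]
    simp [List.append_assoc]

theorem totalSeq_len (f : Nat) (q : List Int) (h : q ≠ []) : f ≤ (totalSeq q f).length := by
  induction f generalizing q with
  | zero => simp
  | succ f ih =>
    show f + 1 ≤ (q ++ totalSeq (q.flatMap childrenA) f).length
    have h1 := ih (q.flatMap childrenA) (flatMap_c_ne_nil h)
    have h2 : 1 ≤ q.length := by cases q with
      | nil => exact absurd rfl h
      | cons x xs => simp
    simp only [List.length_append]; omega

theorem solveLoop_char (r : Nat) (q : List Int) (h : q ≠ []) :
    solveLoop q r = (totalSeq q (r + 1)).getD r 0 := by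
  induction r generalizing q with
  | zero =>
    cases q with
    | nil => exact absurd rfl h
    | cons n rest => simp [solveLoop, totalSeq]
  | succ r ih =>
    cases q with
    | nil => exact absurd rfl h
    | cons n rest =>
      show solveLoop (rest ++ childrenA n) r = _
      rw [ih _ (by simp [childrenA_ne_nil n])]
      have hs := totalSeq_split (r+1) [n] rest
      simp only [List.singleton_append] at hs
      rw [hs]
      have hlen : r < (totalSeq (rest ++ [n].flatMap childrenA) (r+1)).length :=
        Nat.lt_of_lt_of_le (Nat.lt_succ_self r)
          (totalSeq_len (r+1) _ (by simp [childrenA_ne_nil n]))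
      simp only [List.flatMap_cons, List.flatMap_nil, List.append_nil] at hs hlen ⊢
      rw [List.getD_cons_succ, List.getD_append _ _ _ _ hlen]

theorem desc_succ_right (m : Nat) (n : Int) :
    desc (m + 1) n = (desc m n).flatMap childrenA := by
  induction m generalizing n with
  | zero => simp [desc]
  | succ m ih =>
    show (childrenA n).flatMap (desc (m+1)) = ((childrenA n).flatMap (desc m)).flatMap childrenA
    rw [List.flatMap_assoc]
    exact List.flatMap_congr fun x _ => ih x

theorem iterC_eq_desc (m : Nat) (q : List Int) : iterC m q = q.flatMap (desc m) := by
  induction m with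
  | zero => simp [iterC, desc]
  | succ m ih =>
    show (iterC m q).flatMap childrenA = _
    rw [ih, List.flatMap_assoc]
    exact List.flatMap_congr fun x _ => (desc_succ_right m x).symm

theorem sum_ge_len' (l : List Int) (h : ∀ x ∈ l, 1 ≤ x) : (l.length : Int) ≤ l.sum := by
  induction l with
  | nil => simp
  | cons x xs ih =>
    have := h x (by simp)
    have := ih (fun y hy => h y (by simp [hy]))
    simp only [List.length_cons, List.sum_cons]
    push_cast; omega

theorem W_pos (m : Nat) (d : Int) : 1 ≤ W m d := by
  induction m generalizing d with
  | zero => simp [W]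
  | succ m ih =>
    show 1 ≤ ((candL d).map (W m)).sum
    have h1 := sum_ge_len' ((candL d).map (W m)) (by
      intro x hx
      obtain ⟨y, _, rfl⟩ := List.mem_map.mp hx
      exact ih y)
    have h2 : 0 < (candL d).length := List.length_pos_iff.mpr (candL_ne_nil d)
    simp only [List.length_map] at h1
    omega

theorem sum_toNat_eq (l : List Int) (h : ∀ x ∈ l, 0 ≤ x) :
    l.sum.toNat = (l.map Int.toNat).sum := by
  induction l with
  | nil => simp
  | cons x xs ih =>
    have hx : 0 ≤ x := h x (by simp)
    have hxs : 0 ≤ xs.sum := List.sum_nonneg (fun y hy => h y (by simp [hy]))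
    simp only [List.sum_cons, List.map_cons]
    rw [← ih (fun y hy => h y (by simp [hy]))]
    omega

theorem desc_len (m : Nat) (n : Int) (hn : 1 ≤ n) :
    (desc m n).length = (W m (PySem.Int.mod n 10)).toNat := by
  induction m generalizing n with
  | zero => simp [desc, W]
  | succ m ih =>
    obtain ⟨hl0, hl1⟩ := mod10_lt n
    show ((childrenA n).flatMap (desc m)).length = _
    rw [childrenA_eq, List.length_flatMap, List.map_map]
    have hmap : ∀ d ∈ candL (PySem.Int.mod n 10),
        ((fun a => (desc m a).length) ∘ fun d => n * 10 + d) d = Int.toNat (W m d) := by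
      intro d hd
      obtain ⟨hd0, hd1⟩ := candL_mem hl0 hl1 hd
      have : 1 ≤ n * 10 + d := by omega
      simp only [Function.comp_apply]
      rw [ih _ this, mod10_digit n d hd0 hd1]
    rw [List.map_congr_left hmap]
    show ((candL (PySem.Int.mod n 10)).map (fun d => (W m d).toNat)).sum = (W (m+1) (PySem.Int.mod n 10)).toNat
    show _ = ((candL (PySem.Int.mod n 10)).map (W m)).sum.toNat
    rw [sum_toNat_eq _ (by
      intro x hx
      obtain ⟨y, _, rfl⟩ := List.mem_map.mp hx
      exact le_trans (by norm_num) (W_pos m y))]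
    rw [List.map_map]
    rfl

theorem wRow_getD (m : Nat) (d : Int) (h0 : 0 ≤ d) (h1 : d < 10) :
    PySem.List.pyGetD (wRow m) d 0 = W m d := by
  unfold wRow
  exact PySem.List.pyGetD_map_pyRange_of_nonneg _ 10 d 0 h0 h1

theorem rowTotal_wRow' (m : Nat) :
    rowTotal (wRow m) = T m := by
  unfold rowTotal
  unfold wRow T init9
  rw [PySem.List.slice_from_one]
  rw [PySem.List.pyRange_one_cons (by norm_num)]
  simp

theorem T_ge (m : Nat) : 9 ≤ T m := by
  have h1 := sum_ge_len' (init9.map (W m)) (by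
    intro x hx
    obtain ⟨y, _, rfl⟩ := List.mem_map.mp hx
    exact W_pos m y)
  simp only [List.length_map] at h1
  have : init9.length = 9 := by decide
  rw [this] at h1
  exact le_trans (by norm_num) h1

theorem nextRow_wRow (m : Nat) : nextRowB (wRow m) = wRow (m + 1) := by
  have hR : PySem.List.pyRange 0 10 1 = [0,1,2,3,4,5,6,7,8,9] := by decide
  simp only [nextRowB, hR, List.map_cons, List.map_nil]
  conv_rhs => rw [wRow, hR]
  norm_num [wRow_getD m]
  norm_num [W, candL]
  omega

theorem recRows_cons (m : Nat) : ∃ t, recRows m = wRow m :: t := by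
  cases m with
  | zero => exact ⟨[], rfl⟩
  | succ m => exact ⟨recRows m, rfl⟩

theorem grow_char : ∀ (fuel m : Nat) (k : Int), 1 ≤ k → k ≤ 9 * (fuel : Int) + 9 →
    ∃ m' k', growB fuel k (recRows m) = (k', recRows m') ∧
      1 ≤ k' ∧ k' ≤ T m' ∧ m ≤ m' ∧ k' = k - (SumT m' - SumT m) := by
  intro fuel
  induction fuel with
  | zero =>
    intro m k hk1 hk2
    refine ⟨m, k, rfl, hk1, le_trans (by exact_mod_cast hk2) (by simpa using T_ge m), le_refl m, by ring⟩
  | succ fuel ih =>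
    intro m k hk1 hk2
    obtain ⟨t, ht⟩ := recRows_cons m
    have hhead : (recRows m).headD [] = wRow m := by rw [ht]; rfl
    have hT := T_ge m
    simp only [growB, hhead, rowTotal_wRow']
    split_ifs with hlt
    · rw [nextRow_wRow]
      have hrec : wRow (m+1) :: recRows m = recRows (m+1) := rfl
      rw [hrec]
      obtain ⟨m', k', heq, h1, h2, h3, h4⟩ := ih (m+1) (k - T m) (by omega) (by push_cast at hk2 ⊢; omega)
      refine ⟨m', k', heq, h1, h2, by omega, ?_⟩
      have : SumT (m+1) = SumT m + T m := rfl
      omega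
    · exact ⟨m, k, rfl, hk1, by omega, le_refl m, by ring⟩

theorem pickD_char (m : Nat) : ∀ (cand : List Int) (k : Int),
    (∀ d ∈ cand, 0 ≤ d ∧ d < 10) → 1 ≤ k → k ≤ (cand.map (W m)).sum →
    ∃ pre d post, cand = pre ++ d :: post ∧
      pickD k (wRow m) cand = (k - (pre.map (W m)).sum, d) ∧
      1 ≤ k - (pre.map (W m)).sum ∧ k - (pre.map (W m)).sum ≤ W m d := by
  intro cand
  induction cand with
  | nil =>
    intro k _ hk1 hk2
    simp at hk2; omega
  | cons d0 ds ih =>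
    intro k hmem hk1 hk2
    obtain ⟨h0, h1⟩ := hmem d0 (by simp)
    have hget : PySem.List.pyGetD (wRow m) d0 0 = W m d0 := wRow_getD m d0 h0 h1
    simp only [pickD, hget]
    split_ifs with hlt
    · obtain ⟨pre, d, post, hsplit, heq, hk1', hk2'⟩ := ih (k - W m d0)
        (fun x hx => hmem x (by simp [hx])) (by omega)
        (by simp only [List.map_cons, List.sum_cons] at hk2; omega)
      refine ⟨d0 :: pre, d, post, by rw [hsplit]; simp, ?_, ?_, ?_⟩ <;>
        simp only [List.map_cons, List.sum_cons, heq] <;> [skip; omega; omega]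
      congr 1; omega
    · exact ⟨[], d0, ds, rfl, by simp, by simpa using hk1, by simpa using hlt⟩

theorem flat_len (m : Nat) (n : Int) (l : List Int)
    (h : ∀ d ∈ l, 0 ≤ d ∧ d < 10 ∧ 1 ≤ n * 10 + d) :
    (l.flatMap (fun d => desc m (n * 10 + d))).length = ((l.map (W m)).sum).toNat := by
  rw [List.length_flatMap]
  rw [List.map_congr_left (f := fun a => (desc m (n * 10 + a)).length)
    (g := fun d => (W m d).toNat) (fun d hd => by
      obtain ⟨h0, h1, h2⟩ := h d hd
      simp only []
      rw [desc_len m _ h2, mod10_digit n d h0 h1])]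
  rw [sum_toNat_eq _ (fun x hx => by
    obtain ⟨y, _, rfl⟩ := List.mem_map.mp hx
    exact le_trans (by norm_num) (W_pos m y))]
  rw [List.map_map]
  rfl

theorem pick_correct : ∀ (m : Nat) (k n : Int) (cand : List Int), 0 ≤ n →
    (∀ d ∈ cand, 0 ≤ d ∧ d < 10 ∧ 1 ≤ n * 10 + d) → 1 ≤ k →
    k ≤ (cand.map (W m)).sum →
    pickLoop (recRows m) k n cand =
      (cand.flatMap (fun d => desc m (n * 10 + d))).getD (k.toNat - 1) 0 := by
  intro m
  induction m with
  | zero =>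
    intro k n cand hn hmem hk1 hk2
    obtain ⟨pre, d, post, hsplit, hpick, hk1', hk2'⟩ :=
      pickD_char 0 cand k (fun x hx => ⟨(hmem x hx).1, (hmem x hx).2.1⟩) hk1 hk2
    show (match pickD k (wRow 0) cand with
      | (k', d) => pickLoop [] k' (n * 10 + d)
          (PySem.List.pyRange (max (d - 1) 0) (min (d + 1) 9 + 1) 1)) = _
    rw [hpick]
    show n * 10 + d = _
    subst hsplit
    set S := (pre.map (W 0)).sum with hS
    have hW0 : W 0 d = 1 := rfl
    have hk' : k - S = 1 := by rw [hW0] at hk2'; omega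
    have hS0 : 0 ≤ S := List.sum_nonneg (fun x hx => by
      obtain ⟨y, _, rfl⟩ := List.mem_map.mp hx
      exact le_trans (by norm_num) (W_pos 0 y))
    rw [List.flatMap_append]
    have hlen := flat_len 0 n pre (fun x hx => hmem x (by simp [hx]))
    rw [List.getD_append_right _ _ _ _ (by rw [hlen]; omega)]
    rw [hlen, ← hS]
    have hidx : k.toNat - 1 - S.toNat = 0 := by omega
    rw [hidx]
    simp [desc]
  | succ m ih =>
    intro k n cand hn hmem hk1 hk2
    obtain ⟨pre, d, post, hsplit, hpick, hk1', hk2'⟩ :=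
      pickD_char (m+1) cand k (fun x hx => ⟨(hmem x hx).1, (hmem x hx).2.1⟩) hk1 hk2
    show (match pickD k (wRow (m+1)) cand with
      | (k', d) => pickLoop (recRows m) k' (n * 10 + d)
          (PySem.List.pyRange (max (d - 1) 0) (min (d + 1) 9 + 1) 1)) = _
    rw [hpick]
    show pickLoop (recRows m) (k - (pre.map (W (m+1))).sum) (n * 10 + d) _ = _
    obtain ⟨hd0, hd1, hd2⟩ := hmem d (by rw [hsplit]; simp)
    rw [candR_eq d hd0 hd1]
    set S := (pre.map (W (m+1))).sum with hS
    have hS0 : 0 ≤ S := List.sum_nonneg (fun x hx => by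
      obtain ⟨y, _, rfl⟩ := List.mem_map.mp hx
      exact le_trans (by norm_num) (W_pos (m+1) y))
    have hWsum : ((candL d).map (W m)).sum = W (m+1) d := rfl
    have hmem' : ∀ d' ∈ candL d, 0 ≤ d' ∧ d' < 10 ∧ 1 ≤ (n * 10 + d) * 10 + d' := by
      intro d' hd'
      obtain ⟨e0, e1⟩ := candL_mem hd0 hd1 hd'
      exact ⟨e0, e1, by omega⟩
    rw [ih (k - S) (n * 10 + d) (candL d) (by omega) hmem' hk1' (by rw [hWsum]; exact hk2')]
    -- now rewrite the RHS
    subst hsplit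
    rw [List.flatMap_append]
    have hlen := flat_len (m+1) n pre (fun x hx => hmem x (by simp [hx]))
    rw [List.getD_append_right _ _ _ _ (by rw [hlen, ← hS]; omega)]
    rw [hlen, ← hS]
    rw [List.flatMap_cons]
    have hdesc : desc (m+1) (n * 10 + d) =
        (candL d).flatMap (fun d' => desc m ((n * 10 + d) * 10 + d')) := by
      show (childrenA (n * 10 + d)).flatMap (desc m) = _
      rw [childrenA_eq, mod10_digit n d hd0 hd1, List.flatMap_map]
    have hchunklen : (desc (m+1) (n * 10 + d)).length = (W (m+1) d).toNat := by
      rw [desc_len _ _ hd2, mod10_digit n d hd0 hd1]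
    rw [List.getD_append _ _ _ _ (by rw [hchunklen]; omega)]
    rw [hdesc]
    congr 1
    omega

theorem iterC_init_len (m : Nat) : (iterC m init9).length = (T m).toNat := by
  rw [iterC_eq_desc, List.length_flatMap]
  rw [List.map_congr_left (f := fun a => (desc m a).length)
    (g := fun d => (W m d).toNat) (fun d hd => by
      have hd' := PySem.List.mem_pyRange_one.mp hd
      simp only []
      rw [desc_len m d (by omega), mod10_self d (by omega) (by omega)])]
  rw [show (T m).toNat = ((init9.map (W m)).sum).toNat from rfl]
  rw [sum_toNat_eq _ (fun x hx => by
    obtain ⟨y, _, rfl⟩ := List.mem_map.mp hx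
    exact le_trans (by norm_num) (W_pos m y))]
  rw [List.map_map]
  rfl

theorem LS_succ_right (m : Nat) : ∀ (q : List Int),
    LS q (m + 1) = LS q m + (iterC m q).length := by
  induction m with
  | zero => intro q; simp [LS, iterC]
  | succ m ih =>
    intro q
    show q.length + LS (q.flatMap childrenA) (m + 1) = (q.length + LS (q.flatMap childrenA) m) + _
    rw [ih (q.flatMap childrenA), ← iterC_succ_left]
    omega

theorem LS_init_eq (m : Nat) : (LS init9 m : Int) = SumT m := by
  induction m with
  | zero => rfl
  | succ m ih =>
    rw [LS_succ_right m init9, iterC_init_len m]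
    show ((LS init9 m : Int) + ((T m).toNat : Int)) = SumT m + T m
    have := T_ge m
    omega

theorem SumT_ge (m : Nat) : 9 * (m : Int) ≤ SumT m := by
  induction m with
  | zero => simp [SumT]
  | succ m ih =>
    have := T_ge m
    show _ ≤ SumT m + T m
    push_cast
    omega

theorem totalSeq_getD : ∀ (m f : Nat) (q : List Int) (r : Nat), r < (iterC m q).length →
    m < f → (totalSeq q f).getD (LS q m + r) 0 = (iterC m q).getD r 0 := by
  intro m
  induction m with
  | zero =>
    intro f q r hr hf
    obtain ⟨f', rfl⟩ : ∃ f', f = f' + 1 := ⟨f - 1, by omega⟩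
    show (q ++ totalSeq (q.flatMap childrenA) f').getD (0 + r) 0 = q.getD r 0
    rw [Nat.zero_add, List.getD_append _ _ _ _ (by exact hr)]
  | succ m ih =>
    intro f q r hr hf
    obtain ⟨f', rfl⟩ : ∃ f', f = f' + 1 := ⟨f - 1, by omega⟩
    show (q ++ totalSeq (q.flatMap childrenA) f').getD (q.length + LS (q.flatMap childrenA) m + r) 0 = _
    rw [Nat.add_assoc, List.getD_append_right _ _ _ _ (by omega)]
    rw [Nat.add_sub_cancel_left]
    rw [iterC_succ_left] at hr ⊢
    exact ih f' (q.flatMap childrenA) r hr (by omega)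

theorem main_eq (k : Int) (hk : 1 ≤ k) : solve k = solve_alt k := by
  have hcast : ((k.toNat : Int)) = k := Int.toNat_of_nonneg (by omega)
  have hrep : [List.replicate 10 (1 : Int)] = recRows 0 := by decide
  obtain ⟨m', k', heq, hk1', hk2', _, hk4'⟩ :=
    grow_char k.toNat 0 k hk (by omega)
  have hSumT : SumT m' = k - k' := by
    have h0 : SumT 0 = 0 := rfl
    omega
  -- B side
  have hB : solve_alt k = (iterC m' init9).getD (k'.toNat - 1) 0 := by
    show (match growB k.toNat k [List.replicate 10 1] with
      | (k', rrows) => pickLoop rrows k' 0 (PySem.List.pyRange 1 10 1)) = _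
    rw [hrep, heq]
    show pickLoop (recRows m') k' 0 init9 = _
    rw [pick_correct m' k' 0 init9 (le_refl 0) (fun d hd => by
        have := PySem.List.mem_pyRange_one.mp hd
        exact ⟨by omega, by omega, by omega⟩) hk1' hk2']
    rw [List.flatMap_congr (g := desc m') (fun x _ => by norm_num)]
    rw [← iterC_eq_desc]
  -- A side
  have hTm := T_ge m'
  have hST := SumT_ge m'
  have eK : ((T m').toNat : Int) = T m' := Int.toNat_of_nonneg (by omega)
  have eK' : ((k'.toNat : Int)) = k' := Int.toNat_of_nonneg (by omega)
  have eL : (LS init9 m' : Int) = SumT m' := LS_init_eq m'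
  have hr : k'.toNat - 1 < (iterC m' init9).length := by
    rw [iterC_init_len m']; omega
  have hf : m' < (k - 1).toNat + 1 := by
    have e1 : ((k - 1).toNat : Int) = k - 1 := Int.toNat_of_nonneg (by omega)
    omega
  have hidx : (k - 1).toNat = LS init9 m' + (k'.toNat - 1) := by
    have e1 : ((k - 1).toNat : Int) = k - 1 := Int.toNat_of_nonneg (by omega)
    omega
  show solveLoop init9 (k - 1).toNat = solve_alt k
  rw [solveLoop_char _ init9 (by decide), hidx,
    totalSeq_getD m' _ init9 _ hr (by omega), hB]

-- ===== VERDICT (by name: the statement is the Claim_ definition above) =====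
theorem solve_spec : Claim_equal_solve := by
  intro k _ hk
  show solve k = solve_alt k
  exact main_eq k hk
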